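-- pv_equiv track=rewrite | github.com/Berendoska/Homework_python3 | Dis.py | febbon
-- ===== SOURCE A (Python) =====
-- def febbon(k):
--     fibo = []
--     first,sec = 1,1
--     for i in range(k-1):
--         fibo.append(first)
--         first,sec = sec,first+sec
--     first,sec = 0,1
--     for i in range(k):
--         fibo.insert(0, first)
--         first,sec = sec,first-sec
--     return fibo
-- ===== SOURCE B (Python) =====
-- def febbon(k):
--     if k <= 0:
--         return []
--     # climb forward to the top of the range: a = F(k-1), b = F(k)
--     a, b = 0, 1
--     for _ in range(k - 1):
--         a, b = b, a + b
--     # single backward sweep: emit F(n) for n = k-1 down to 1-k using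
--     # F(n-1) = F(n+1) - F(n), then reverse into ascending order
--     out = []
--     for _ in range(2 * k - 1):
--         out.append(a)
--         a, b = b - a, a
--     out.reverse()
--     return out
-- ===== Notes on version B (the rewrite author's own statement) =====
-- stated objective: faster
-- what changed: B drops A's quadratic front-insertion loop and second subtractive recurrence: it climbs the Fibonacci recurrence up to F(k-1), then makes one backward sweep with F(n-1)=F(n+1)-F(n) appending all 2k-1 values and reverses once.
import Mathlib
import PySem

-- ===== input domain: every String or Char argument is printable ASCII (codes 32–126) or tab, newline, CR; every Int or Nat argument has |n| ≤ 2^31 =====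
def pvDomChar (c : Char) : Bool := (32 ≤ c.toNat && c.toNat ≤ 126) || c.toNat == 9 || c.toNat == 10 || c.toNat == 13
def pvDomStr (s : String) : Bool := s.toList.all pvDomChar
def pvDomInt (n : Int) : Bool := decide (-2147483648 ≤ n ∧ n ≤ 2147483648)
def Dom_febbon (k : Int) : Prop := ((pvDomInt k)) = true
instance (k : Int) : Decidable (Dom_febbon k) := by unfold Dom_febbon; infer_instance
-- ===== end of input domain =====

-- B replaces A's quadratic front insertions and second subtractive recurrence with one
-- forward climb plus one linear backward Fibonacci sweep reversed at the end.

-- ===== PORT A =====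
def febbon (k : Int) : List Int :=
  -- first loop: append `first`, (first, sec) := (sec, first+sec)
  let s1 := (PySem.List.pyRange 0 (k-1) 1).foldl
      (fun (st : List Int × Int × Int) _ => (st.1 ++ [st.2.1], st.2.2, st.2.1 + st.2.2))
      ([], 1, 1)
  -- second loop: insert `first` at the front, (first, sec) := (sec, first-sec)
  let s2 := (PySem.List.pyRange 0 k 1).foldl
      (fun (st : List Int × Int × Int) _ => (st.2.1 :: st.1, st.2.2, st.2.1 - st.2.2))
      (s1.1, 0, 1)
  s2.1

-- ===== PORT B =====
def febbon_alt (k : Int) : List Int :=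
  if k ≤ 0 then []
  else
    -- climb forward: a = F(k-1), b = F(k)
    let ab := (PySem.List.pyRange 0 (k-1) 1).foldl
        (fun (p : Int × Int) _ => (p.2, p.1 + p.2)) (0, 1)
    -- backward sweep appending F(k-1), F(k-2), …, F(1-k), then reverse
    let st := (PySem.List.pyRange 0 (2*k-1) 1).foldl
        (fun (q : List Int × Int × Int) _ => (q.1 ++ [q.2.1], q.2.2 - q.2.1, q.2.1))
        ([], ab.1, ab.2)
    st.1.reverse

-- ===== PRECONDITION & SPEC =====
def Spec_febbon (k : Int) (out : List Int) : Prop := out = febbon_alt k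
instance (k : Int) (out : List Int) : Decidable (Spec_febbon k out) := by unfold Spec_febbon; infer_instance

-- ===== CLAIM (what is proved, stated in full; the proofs are below) =====
def Claim_equal_febbon : Prop := ∀ (k : Int), Dom_febbon k → Spec_febbon k (febbon k)

-- ===== LEMMAS AND PROOFS =====

def pvFib : Nat → Int
  | 0 => 0
  | 1 => 1
  | n+2 => pvFib n + pvFib (n+1)

def pvG : Nat → Int
  | 0 => 0
  | 1 => 1
  | n+2 => pvG n - pvG (n+1)

-- Fibonacci extended to Int indices (negafibonacci via pvG)
def fibZ (n : Int) : Int := if 0 ≤ n then pvFib n.toNat else pvG (-n).toNat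

theorem fibZ_rec (n : Int) : fibZ (n+1) - fibZ n = fibZ (n-1) := by
  by_cases h1 : 1 ≤ n
  · obtain ⟨t, rfl⟩ : ∃ t : Nat, n = (t:Int)+1 := ⟨(n-1).toNat, by omega⟩
    have e1 : ((t:Int)+1+1).toNat = t+2 := by omega
    have e2 : ((t:Int)+1).toNat = t+1 := by omega
    have e3 : ((t:Int)+1-1).toNat = t := by omega
    rw [fibZ, fibZ, fibZ, if_pos (by omega), if_pos (by omega), if_pos (by omega), e1, e2, e3]
    have hf : pvFib (t+2) = pvFib t + pvFib (t+1) := rfl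
    rw [hf]; ring
  · by_cases h2 : n = 0
    · subst h2; decide
    · by_cases h3 : n = -1
      · subst h3; decide
      · obtain ⟨m, rfl⟩ : ∃ m : Nat, n = -((m:Int)+2) := ⟨(-n-2).toNat, by omega⟩
        have e1 : (-(-((m:Int)+2)+1)).toNat = m+1 := by omega
        have e2 : (-(-((m:Int)+2))).toNat = m+2 := by omega
        have e3 : (-(-((m:Int)+2)-1)).toNat = m+3 := by omega
        rw [fibZ, fibZ, fibZ, if_neg (by omega), if_neg (by omega), if_neg (by omega), e1, e2, e3]
        have hg : pvG (m+3) = pvG (m+1) - pvG (m+2) := rfl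
        rw [hg]

theorem foldl_ignore {σ α : Type} (f : σ → σ) : ∀ (l : List α) (s : σ),
    l.foldl (fun s _ => f s) s = f^[l.length] s := by
  intro l
  induction l with
  | nil => intro s; rfl
  | cons x xs ih => intro s; simp [List.foldl_cons, ih, Function.iterate_succ_apply]

-- A's first loop
theorem it1 : ∀ (n : Nat) (acc : List Int) (i : Nat),
    (fun st : List Int × Int × Int => (st.1 ++ [st.2.1], st.2.2, st.2.1 + st.2.2))^[n]
      (acc, pvFib (i+1), pvFib (i+2))
    = (acc ++ (List.range n).map (fun j => pvFib (i+1+j)), pvFib (n+i+1), pvFib (n+i+2)) := by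
  intro n
  induction n with
  | zero => intro acc i; simp
  | succ n ih =>
    intro acc i
    rw [Function.iterate_succ_apply]
    have hstep : (fun st : List Int × Int × Int => (st.1 ++ [st.2.1], st.2.2, st.2.1 + st.2.2))^[n]
        ((acc, pvFib (i+1), pvFib (i+2)).1 ++ [(acc, pvFib (i+1), pvFib (i+2)).2.1],
         (acc, pvFib (i+1), pvFib (i+2)).2.2,
         (acc, pvFib (i+1), pvFib (i+2)).2.1 + (acc, pvFib (i+1), pvFib (i+2)).2.2)
        = (fun st : List Int × Int × Int => (st.1 ++ [st.2.1], st.2.2, st.2.1 + st.2.2))^[n]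
          (acc ++ [pvFib (i+1)], pvFib (i+2), pvFib (i+3)) := rfl
    rw [hstep, ih]
    refine Prod.ext ?_ (Prod.ext (by simp; congr 1; omega) (by simp; congr 1; omega))
    simp [List.range_succ_eq_map, List.map_map, List.append_assoc]
    intro j hj
    congr 1
    omega

-- A's second loop
theorem it2 : ∀ (n : Nat) (L : List Int) (i : Nat),
    (fun st : List Int × Int × Int => (st.2.1 :: st.1, st.2.2, st.2.1 - st.2.2))^[n]
      (L, pvG i, pvG (i+1))
    = ((List.range n).map (fun j => pvG (i+n-1-j)) ++ L, pvG (i+n), pvG (i+n+1)) := by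
  intro n
  induction n with
  | zero => intro L i; simp
  | succ n ih =>
    intro L i
    rw [Function.iterate_succ_apply]
    have hstep : (fun st : List Int × Int × Int => (st.2.1 :: st.1, st.2.2, st.2.1 - st.2.2))^[n]
        ((L, pvG i, pvG (i+1)).2.1 :: (L, pvG i, pvG (i+1)).1,
         (L, pvG i, pvG (i+1)).2.2,
         (L, pvG i, pvG (i+1)).2.1 - (L, pvG i, pvG (i+1)).2.2)
        = (fun st : List Int × Int × Int => (st.2.1 :: st.1, st.2.2, st.2.1 - st.2.2))^[n]
          (pvG i :: L, pvG (i+1), pvG (i+2)) := rfl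
    rw [hstep, ih]
    refine Prod.ext ?_ (Prod.ext (by simp; congr 1; omega) (by simp; congr 1; omega))
    simp only [List.range_succ, List.map_append, List.map_cons, List.map_nil]
    rw [List.append_assoc]
    simp

-- B's forward climb
theorem itB1 : ∀ (m i : Nat),
    (fun p : Int × Int => (p.2, p.1 + p.2))^[m] (pvFib i, pvFib (i+1))
    = (pvFib (m+i), pvFib (m+i+1)) := by
  intro m
  induction m with
  | zero => intro i; simp
  | succ m ih =>
    intro i
    rw [Function.iterate_succ_apply]
    show (fun p : Int × Int => (p.2, p.1 + p.2))^[m] (pvFib (i+1), pvFib i + pvFib (i+1)) = _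
    have hf : pvFib i + pvFib (i+1) = pvFib (i+1+1) := rfl
    rw [hf, ih, show m+(i+1) = m+1+i from by omega]

-- B's backward sweep
theorem itB2 : ∀ (m : Nat) (out : List Int) (n : Int),
    (fun q : List Int × Int × Int => (q.1 ++ [q.2.1], q.2.2 - q.2.1, q.2.1))^[m]
      (out, fibZ n, fibZ (n+1))
    = (out ++ (List.range m).map (fun j : Nat => fibZ (n - (j:Int))),
       fibZ (n - m), fibZ (n - m + 1)) := by
  intro m
  induction m with
  | zero => intro out n; simp
  | succ m ih =>
    intro out n
    rw [Function.iterate_succ_apply]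
    show (fun q : List Int × Int × Int => (q.1 ++ [q.2.1], q.2.2 - q.2.1, q.2.1))^[m]
        (out ++ [fibZ n], fibZ (n+1) - fibZ n, fibZ n) = _
    have hst : ((out ++ [fibZ n], fibZ (n+1) - fibZ n, fibZ n) : List Int × Int × Int)
        = (out ++ [fibZ n], fibZ (n-1), fibZ ((n-1)+1)) := by
      rw [fibZ_rec n]; norm_num
    rw [hst, ih]
    refine Prod.ext ?_ (Prod.ext (by show fibZ _ = fibZ _; congr 1; push_cast; ring)
      (by show fibZ _ = fibZ _; congr 1; push_cast; ring))
    show out ++ [fibZ n] ++ (List.range m).map (fun j : Nat => fibZ (n - 1 - (j:Int)))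
        = out ++ (List.range (m+1)).map (fun j : Nat => fibZ (n - (j:Int)))
    have htail : (List.range m).map ((fun j : Nat => fibZ (n - (j:Int))) ∘ Nat.succ)
        = (List.range m).map (fun j : Nat => fibZ (n - 1 - (j:Int))) := by
      apply List.map_congr_left
      intro j _
      simp only [Function.comp_apply]
      congr 1
      push_cast
      ring
    rw [List.range_succ_eq_map, List.map_cons, List.map_map, List.append_assoc,
      List.singleton_append, htail]
    simp

theorem rev_map_range (M : Nat) (f : Nat → Int) :
    ((List.range M).map f).reverse = (List.range M).map (fun j => f (M-1-j)) := by
  apply List.ext_getElem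
  · simp
  · intro i h1 h2
    simp only [List.length_reverse, List.length_map, List.length_range] at h1 h2
    rw [List.getElem_reverse]
    simp only [List.getElem_map, List.getElem_range, List.length_map, List.length_range]

theorem fibZ_neg_eq (K j : Nat) (h : j < K) : fibZ (1 - (K:Int) + j) = pvG (K-1-j) := by
  by_cases he : j = K - 1
  · subst he
    have h0 : (1 - (K:Int) + (K-1:Nat)) = 0 := by omega
    rw [h0]
    simp [fibZ, pvFib, pvG]
  · have hn : ¬ (0:Int) ≤ 1 - (K:Int) + j := by omega
    rw [fibZ, if_neg hn]
    congr 1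
    omega

theorem febbon_pos (k : Int) (hk : 0 < k) : febbon k = febbon_alt k := by
  obtain ⟨K, rfl⟩ : ∃ K : Nat, k = (K : Int) := ⟨k.toNat, by omega⟩
  have hK : 1 ≤ K := by omega
  simp only [febbon, febbon_alt, if_neg (by omega : ¬ ((K:Int) ≤ 0))]
  rw [foldl_ignore, foldl_ignore, foldl_ignore, foldl_ignore]
  have hlen1 : (PySem.List.pyRange 0 ((K:Int)-1) 1).length = K - 1 := by
    rw [PySem.List.length_pyRange_one]; omega
  have hlen2 : (PySem.List.pyRange 0 (K:Int) 1).length = K := by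
    rw [PySem.List.length_pyRange_one]; omega
  have hlen3 : (PySem.List.pyRange 0 (2*(K:Int)-1) 1).length = 2*K - 1 := by
    rw [PySem.List.length_pyRange_one]; omega
  rw [hlen1, hlen2, hlen3]
  -- A side
  have hinit1 : (([], 1, 1) : List Int × Int × Int) = ([], pvFib 1, pvFib 2) := by
    norm_num [pvFib]
  rw [hinit1, it1]
  have h0 : ∀ L : List Int, ((L, 0, 1) : List Int × Int × Int) = (L, pvG 0, pvG 1) := by
    intro L; norm_num [pvG]
  rw [h0, it2]
  -- B side
  have hinitB : ((0, 1) : Int × Int) = (pvFib 0, pvFib 1) := by norm_num [pvFib]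
  rw [hinitB, itB1]
  have hF1 : pvFib (K-1+0) = fibZ ((K:Int)-1) := by
    rw [fibZ, if_pos (by omega)]; congr 1; omega
  have hF2 : pvFib (K-1+0+1) = fibZ (((K:Int)-1)+1) := by
    rw [fibZ, if_pos (by omega)]; congr 1; omega
  rw [hF1, hF2, itB2]
  simp only [List.nil_append]
  rw [rev_map_range (2*K-1) (fun j : Nat => fibZ ((K:Int)-1 - (j:Int)))]
  -- both sides are now concrete maps over ranges; compare elementwise
  -- split the B-side range (2K-1) = K + (K-1)
  rw [show 2*K-1 = K + (K-1) from by omega, List.range_add, List.map_append, List.map_map]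
  congr 1
  · -- front K elements: pvG part
    apply List.map_congr_left
    intro j hj
    simp only [List.mem_range] at hj
    have e : (K:Int) - 1 - ((K + (K-1) - 1 - j : Nat) : Int) = 1 - (K:Int) + j := by omega
    rw [e, fibZ_neg_eq K j hj]
    congr 1
    omega
  · -- tail K-1 elements: pvFib part
    apply List.map_congr_left
    intro j hj
    simp only [List.mem_range, Function.comp_apply] at hj ⊢
    have e : (K:Int) - 1 - ((K + (K-1) - 1 - (K + j) : Nat) : Int) = ((j+1 : Nat) : Int) := by
      omega
    rw [e, fibZ, if_pos (by omega)]
    congr 1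
    omega

-- ===== VERDICT (by name: the statement is the Claim_ definition above) =====
theorem febbon_spec : Claim_equal_febbon := by
  intro k _
  unfold Spec_febbon
  by_cases hk : k ≤ 0
  · simp [febbon, febbon_alt, hk, PySem.List.pyRange_one_eq_nil (by omega : k - 1 ≤ 0),
      PySem.List.pyRange_one_eq_nil (by omega : k ≤ 0)]
  · exact febbon_pos k (by omega)
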